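-- pv_equiv track=rewrite | github.com/AT190510-Cuong/ThuatToanATTT | cuoi_ky/phan_1/cau_22.py | result
-- ===== SOURCE A (Python) =====
-- import math
--
-- def check_snt(n):
--     if n<2:
--         return False
--     else:
--         for i in range(2,int(math.sqrt(n)+1)):
--             if n%i ==0:
--                 return False
--         return True
--
-- def result(number_l, number_r):
--     sum = 0
--     for i in range(number_l, number_r):
--         if check_snt(i):
--             Fi = i
--         else:
--             Fi = 0
--         for j in range(i + 1, number_r + 1):
--             if check_snt(j):
--                 Fj = j
--             else:
--                 Fj = 0
--             sum += (Fi * Fj)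
--     return sum
-- ===== SOURCE B (Python) =====
-- import math
--
-- def is_prime(n):
--     if n < 2:
--         return False
--     for d in range(2, math.isqrt(n) + 1):
--         if n % d == 0:
--             return False
--     return True
--
-- def result(number_l, number_r):
--     s = 0
--     q = 0
--     for i in range(number_l, number_r + 1):
--         if is_prime(i):
--             s += i
--             q += i * i
--     return (s * s - q) // 2
-- ===== Notes on version B (the rewrite author's own statement) =====
-- stated objective: alternative
-- what changed: Replaces the nested all-pairs double loop by a single pass collecting the sum S and sum of squares Q of primes in [l, r] and returning (S^2 - Q)//2.
import Mathlib
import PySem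

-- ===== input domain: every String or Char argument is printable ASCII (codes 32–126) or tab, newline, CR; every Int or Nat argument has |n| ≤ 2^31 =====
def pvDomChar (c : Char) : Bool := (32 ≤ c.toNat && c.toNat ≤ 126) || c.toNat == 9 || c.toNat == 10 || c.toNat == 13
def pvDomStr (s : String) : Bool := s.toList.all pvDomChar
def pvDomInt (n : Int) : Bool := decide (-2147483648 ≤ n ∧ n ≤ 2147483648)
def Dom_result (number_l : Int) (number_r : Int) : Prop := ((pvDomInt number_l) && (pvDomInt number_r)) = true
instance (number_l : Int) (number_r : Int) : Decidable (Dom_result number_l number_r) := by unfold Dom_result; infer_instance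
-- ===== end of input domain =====

-- B replaces A's all-pairs double loop by one pass over the range collecting the sum S and
-- sum of squares Q of the primes, returning (S*S - Q) // 2 (objective: alternative algorithm).

-- ===== PORT A =====
-- 'int(math.sqrt(n)+1)' equals isqrt(n)+1 exactly for 2 ≤ n ≤ 2^31 (double sqrt is
-- correctly rounded and cannot land on the next integer there), ported as Nat.sqrt + 1.
def check_snt (n : Int) : Bool :=
  if n < 2 then false
  else (PySem.List.pyRange 2 ((n.toNat.sqrt : Int) + 1) 1).all (fun i => PySem.Int.mod n i != 0)

def result (number_l : Int) (number_r : Int) : Int :=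
  (PySem.List.pyRange number_l number_r 1).foldl
    (fun sum i =>
      let Fi : Int := if check_snt i then i else 0
      (PySem.List.pyRange (i + 1) (number_r + 1) 1).foldl
        (fun sum j =>
          let Fj : Int := if check_snt j then j else 0
          sum + Fi * Fj) sum)
    0

-- ===== PORT B =====
def is_prime (n : Int) : Bool :=
  if n < 2 then false
  else (PySem.List.pyRange 2 ((n.toNat.sqrt : Int) + 1) 1).all (fun d => PySem.Int.mod n d != 0)

def result_alt (number_l : Int) (number_r : Int) : Int :=
  let p := (PySem.List.pyRange number_l (number_r + 1) 1).foldl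
    (fun (sq : Int × Int) i => if is_prime i then (sq.1 + i, sq.2 + i * i) else sq) (0, 0)
  PySem.Int.floordiv (p.1 * p.1 - p.2) 2

-- ===== PRECONDITION & SPEC =====
def Spec_result (number_l : Int) (number_r : Int) (out : Int) : Prop := out = result_alt number_l number_r
instance (number_l : Int) (number_r : Int) (out : Int) : Decidable (Spec_result number_l number_r out) := by unfold Spec_result; infer_instance

-- ===== CLAIM (what is proved, stated in full; the proofs are below) =====
def Claim_equal_result : Prop := ∀ (number_l : Int) (number_r : Int), Dom_result number_l number_r → Spec_result number_l number_r (result number_l number_r)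

-- ===== LEMMAS AND PROOFS =====

-- F n = the value A adds for n: n itself if prime, else 0
def pvF (n : Int) : Int := if check_snt n then n else 0

def pvS (a b : Int) : Int := ((PySem.List.pyRange a b 1).map pvF).sum
def pvQ (a b : Int) : Int := ((PySem.List.pyRange a b 1).map (fun i => pvF i * pvF i)).sum

theorem pvS_nil {a b : Int} (h : b ≤ a) : pvS a b = 0 := by
  simp [pvS, PySem.List.pyRange_one_eq_nil h]

theorem pvQ_nil {a b : Int} (h : b ≤ a) : pvQ a b = 0 := by
  simp [pvQ, PySem.List.pyRange_one_eq_nil h]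

theorem pvS_cons {a b : Int} (h : a < b) : pvS a b = pvF a + pvS (a + 1) b := by
  simp [pvS, PySem.List.pyRange_one_cons h]

theorem pvQ_cons {a b : Int} (h : a < b) : pvQ a b = pvF a * pvF a + pvQ (a + 1) b := by
  simp [pvQ, PySem.List.pyRange_one_cons h]

-- A's inner loop
theorem inner_fold (xs : List Int) (Fi : Int) : ∀ s : Int,
    xs.foldl (fun sum j => sum + Fi * (if check_snt j then j else 0)) s
      = s + Fi * (xs.map pvF).sum := by
  induction xs with
  | nil => intro s; simp
  | cons x xs ih =>
      intro s
      simp only [List.foldl_cons, List.map_cons, List.sum_cons, ih, pvF]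
      ring

-- A's outer loop as a sum over the range
theorem outer_fold (r : Int) (xs : List Int) : ∀ s : Int,
    xs.foldl (fun sum i =>
      (PySem.List.pyRange (i + 1) (r + 1) 1).foldl
        (fun sum j => sum + (if check_snt i then i else 0) * (if check_snt j then j else 0)) sum) s
      = s + (xs.map (fun i => pvF i * pvS (i + 1) (r + 1))).sum := by
  induction xs with
  | nil => intro s; simp
  | cons x xs ih =>
      intro s
      simp only [List.foldl_cons, List.map_cons, List.sum_cons]
      rw [inner_fold, ih]
      simp only [pvF, pvS]
      ring

theorem result_eq_sum (l r : Int) :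
    result l r = ((PySem.List.pyRange l r 1).map (fun i => pvF i * pvS (i + 1) (r + 1))).sum := by
  have := outer_fold r (PySem.List.pyRange l r 1) 0
  simpa [result] using this

-- A's result: 2 * result l r = S^2 - Q over the range [l, r]
theorem two_mul_result (r : Int) : ∀ (n : Nat) (l : Int), (r - l).toNat = n →
    2 * result l r = pvS l (r + 1) * pvS l (r + 1) - pvQ l (r + 1) := by
  intro n
  induction n with
  | zero =>
      intro l hn
      have hrl : r ≤ l := by omega
      rcases lt_or_eq_of_le hrl with h | h
      · rw [result_eq_sum]
        simp [PySem.List.pyRange_one_eq_nil hrl,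
          pvS_nil (by omega : r + 1 ≤ l), pvQ_nil (by omega : r + 1 ≤ l)]
      · subst h
        have h0 : result r r = 0 := by
          rw [result_eq_sum, PySem.List.pyRange_one_eq_nil le_rfl]; simp
        rw [h0, pvS_cons (by omega : r < r + 1), pvS_nil (le_refl (r + 1)),
          pvQ_cons (by omega : r < r + 1), pvQ_nil (le_refl (r + 1))]
        ring
  | succ n ih =>
      intro l hn
      have hlr : l < r := by omega
      have step : result l r = pvF l * pvS (l + 1) (r + 1) + result (l + 1) r := by
        rw [result_eq_sum, result_eq_sum, PySem.List.pyRange_one_cons hlr]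
        simp
      have ihl := ih (l + 1) (by omega)
      rw [step, pvS_cons (by omega : l < r + 1), pvQ_cons (by omega : l < r + 1)]
      nlinarith [ihl]

-- B's accumulating fold computes (S, Q)
theorem b_fold (xs : List Int) : ∀ a b : Int,
    xs.foldl (fun (sq : Int × Int) i => if is_prime i then (sq.1 + i, sq.2 + i * i) else sq) (a, b)
      = (a + (xs.map pvF).sum, b + (xs.map (fun i => pvF i * pvF i)).sum) := by
  induction xs with
  | nil => intro a b; simp
  | cons x xs ih =>
      intro a b
      have hip : is_prime x = check_snt x := rfl
      by_cases h : check_snt x = true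
      · simp [List.foldl_cons, hip, h, ih, pvF]; constructor <;> ring
      · simp [List.foldl_cons, hip, h, ih, pvF]

-- ===== VERDICT (by name: the statement is the Claim_ definition above) =====
theorem result_spec : Claim_equal_result := by
  intro l r _
  unfold Spec_result result_alt
  rw [b_fold]
  simp only [zero_add]
  have h2 := two_mul_result r (r - l).toNat l rfl
  have hs : ((PySem.List.pyRange l (r + 1) 1).map pvF).sum = pvS l (r + 1) := rfl
  have hq : ((PySem.List.pyRange l (r + 1) 1).map (fun i => pvF i * pvF i)).sum = pvQ l (r + 1) := rfl
  rw [hs, hq, ← h2, PySem.Int.floordiv_eq_ediv_of_pos (by norm_num)]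
  omega
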